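-- pv_equiv track=rewrite | github.com/demisto/content | Packs/IOCParser/Integrations/IOCParser/IOCParser.py | limit_response
-- ===== SOURCE A (Python) =====
-- from typing import Any, Dict, List
--
-- def limit_response(response_data: Any, limit: int) -> dict:
--     """
--     Trims the result from the API according to limit parameter.
--     Args:
--         response_data: Dictionary of an IOC as key and a list of all IOCs from this type as value
--         limit: maximum number of results to return
--
--     Returns:
--         New dictionary with at most "limit" results
--     """
--
--     limited_response: Dict[str, List[str]] = {}
--     for ioc_type, iocs in response_data.items():
--         for ioc in iocs:
--             if limit > 0:
--                 limited_response.setdefault(ioc_type, []).append(ioc)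
--                 limit -= 1
--             else:
--                 return limited_response
--     return limited_response
-- ===== SOURCE B (Python) =====
-- def limit_response(response_data, limit):
--     limited = {}
--     remaining = limit
--     for ioc_type, iocs in response_data.items():
--         if remaining <= 0:
--             break
--         taken = iocs[:remaining]
--         if taken:
--             limited[ioc_type] = list(taken)
--             remaining -= len(taken)
--     return limited
-- ===== Notes on version B (the rewrite author's own statement) =====
-- stated objective: simpler
-- what changed: Replaces A's nested per-element loop (setdefault/append plus a decrementing counter and mid-loop early return) by a single loop over the lists that slices each list to the remaining budget and breaks when the budget is exhausted.
import Mathlib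
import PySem

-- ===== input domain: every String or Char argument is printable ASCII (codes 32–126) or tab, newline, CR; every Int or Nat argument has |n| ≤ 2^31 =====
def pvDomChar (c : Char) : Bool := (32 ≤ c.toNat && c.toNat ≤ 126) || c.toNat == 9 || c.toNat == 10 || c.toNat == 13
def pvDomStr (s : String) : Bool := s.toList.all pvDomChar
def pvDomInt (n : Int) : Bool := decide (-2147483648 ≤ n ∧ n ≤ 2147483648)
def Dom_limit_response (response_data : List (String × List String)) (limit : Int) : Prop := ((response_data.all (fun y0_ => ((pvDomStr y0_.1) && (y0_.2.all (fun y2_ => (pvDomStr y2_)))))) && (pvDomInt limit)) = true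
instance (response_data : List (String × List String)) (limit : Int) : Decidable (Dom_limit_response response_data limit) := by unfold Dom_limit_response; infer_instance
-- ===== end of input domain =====

-- B replaces A's nested per-element loop (setdefault/append + counter) by one loop over the
-- lists that slices each list to the remaining budget; objective: simpler.

-- ===== PORT A =====
-- inner 'for ioc in iocs' loop; `.inr d` models the early `return limited_response`,
-- `.inl (d, l)` means the loop finished with dict d and remaining limit l.
-- `limited_response.setdefault(ioc_type, []).append(ioc)` is `d.modify k [] (· ++ [ioc])`.
def pvInnerA (k : String) (iocs : List String) (d : PySem.Dict String (List String)) (l : Int) :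
    (PySem.Dict String (List String) × Int) ⊕ PySem.Dict String (List String) :=
  match iocs with
  | [] => .inl (d, l)
  | ioc :: rest =>
      if l > 0 then pvInnerA k rest (d.modify k [] (· ++ [ioc])) (l - 1)
      else .inr d

-- outer 'for ioc_type, iocs in response_data.items()' loop
def pvOuterA (rows : List (String × List String)) (d : PySem.Dict String (List String)) (l : Int) :
    PySem.Dict String (List String) :=
  match rows with
  | [] => d
  | (k, iocs) :: rest =>
      match pvInnerA k iocs d l with
      | .inr d' => d'
      | .inl (d', l') => pvOuterA rest d' l'

def limit_response (response_data : List (String × List String)) (limit : Int) : List (String × List String) :=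
  (pvOuterA response_data PySem.Dict.empty limit).items

-- ===== PORT B =====
-- single loop: break when remaining ≤ 0, slice the list to the budget, skip empty takes.
def pvGoB (rows : List (String × List String)) (d : PySem.Dict String (List String)) (remaining : Int) :
    PySem.Dict String (List String) :=
  match rows with
  | [] => d
  | (k, iocs) :: rest =>
      if remaining ≤ 0 then d
      else
        let taken := PySem.List.slice iocs none (some remaining)   -- iocs[:remaining]
        if taken = [] then pvGoB rest d remaining
        else pvGoB rest (d.insert k taken) (remaining - taken.length)

def limit_response_alt (response_data : List (String × List String)) (limit : Int) : List (String × List String) :=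
  (pvGoB response_data PySem.Dict.empty limit).items

-- ===== PRECONDITION & SPEC =====
-- Pre_ excludes association lists with duplicate keys: a Python dict (the declared input of A)
-- cannot contain duplicate keys, so the behaviour of the assoc-list image there is not defined by A.
def Pre_limit_response (response_data : List (String × List String)) (limit : Int) : Prop :=
  (response_data.map Prod.fst).Nodup
instance (response_data : List (String × List String)) (limit : Int) : Decidable (Pre_limit_response response_data limit) := by unfold Pre_limit_response; infer_instance

def pvWitness_limit_response : (List (String × List String)) × Int :=
  ([("ip", ["1.1.1.1", "2.2.2.2"]), ("url", ["u"])], 2)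

def Spec_limit_response (response_data : List (String × List String)) (limit : Int) (out : List (String × List String)) : Prop := out = limit_response_alt response_data limit
instance (response_data : List (String × List String)) (limit : Int) (out : List (String × List String)) : Decidable (Spec_limit_response response_data limit out) := by unfold Spec_limit_response; infer_instance

-- ===== CLAIM (what is proved, stated in full; the proofs are below) =====
def Claim_equal_limit_response : Prop := ∀ (response_data : List (String × List String)) (limit : Int), Dom_limit_response response_data limit → Pre_limit_response response_data limit → Spec_limit_response response_data limit (limit_response response_data limit)

-- ===== LEMMAS AND PROOFS =====

-- appending elements one by one at a key already holding v is one insert of v ++ xs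
lemma pvFold_modify_present (k : String) (xs : List String) (d : PySem.Dict String (List String)) (v : List String) :
    xs.foldl (fun d' x => d'.modify k [] (· ++ [x])) (d.insert k v) = d.insert k (v ++ xs) := by
  induction xs generalizing v with
  | nil => simp
  | cons x rest ih =>
      have hstep : (d.insert k v).modify k [] (· ++ [x]) = d.insert k (v ++ [x]) := by
        simp [PySem.Dict.modify, PySem.Dict.getD_insert_self, PySem.Dict.insert_insert_self]
      rw [List.foldl_cons, hstep, ih (v ++ [x])]
      simp

lemma pvFold_modify_fresh (k : String) (x : String) (xs : List String)
    (d : PySem.Dict String (List String)) (hc : d.contains k = false) :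
    (x :: xs).foldl (fun d' y => d'.modify k [] (· ++ [y])) d = d.insert k (x :: xs) := by
  have h1 : d.modify k [] (· ++ [x]) = d.insert k [x] := by
    simp [PySem.Dict.modify, PySem.Dict.getD_of_not_contains d [] hc]
  rw [List.foldl_cons, h1, pvFold_modify_present k xs d [x]]
  simp

-- A's inner loop when the limit covers the whole list: it folds all elements and continues
lemma pvInnerA_run (k : String) (ys : List String) (d : PySem.Dict String (List String)) (m : Int)
    (hm : (ys.length : Int) ≤ m) :
    pvInnerA k ys d m = .inl (ys.foldl (fun dd y => dd.modify k [] (· ++ [y])) d, m - ys.length) := by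
  induction ys generalizing d m with
  | nil => simp [pvInnerA]
  | cons y tl ih =>
      simp only [List.length_cons] at hm
      have hm0 : m > 0 := by push_cast at hm; omega
      simp only [pvInnerA, if_pos hm0, List.foldl_cons]
      have harith : m - 1 - (tl.length : Int) = m - ((y :: tl).length : Int) := by
        simp only [List.length_cons]; push_cast; ring
      rw [ih _ (m - 1) (by push_cast at hm ⊢; omega), harith]

-- A's inner loop when the limit is exhausted before a remaining element: early return
lemma pvInnerA_stop (k : String) (ys zs : List String) (d : PySem.Dict String (List String)) (m : Int)
    (hm : (ys.length : Int) = m) (hz : zs ≠ []) :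
    pvInnerA k (ys ++ zs) d m = .inr (ys.foldl (fun dd y => dd.modify k [] (· ++ [y])) d) := by
  induction ys generalizing d m with
  | nil =>
      match zs, hz with
      | z :: zt, _ =>
          have : ¬ m > 0 := by simp at hm; omega
          simp [pvInnerA, this]
  | cons y tl ih =>
      simp only [List.length_cons] at hm
      have hm0 : m > 0 := by push_cast at hm; omega
      simp only [List.cons_append, pvInnerA, if_pos hm0, List.foldl_cons]
      exact ih _ (m - 1) (by push_cast at hm ⊢; omega)

lemma pvOuterA_nonpos (rows : List (String × List String)) (d : PySem.Dict String (List String))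
    (l : Int) (hl : l ≤ 0) : pvOuterA rows d l = d := by
  induction rows generalizing d with
  | nil => simp [pvOuterA]
  | cons p rest ih =>
      obtain ⟨k, iocs⟩ := p
      match iocs with
      | [] => simp only [pvOuterA, pvInnerA]; exact ih d
      | x :: tl =>
          have : ¬ l > 0 := by omega
          simp [pvOuterA, pvInnerA, this]

lemma pvGoB_nonpos (rows : List (String × List String)) (d : PySem.Dict String (List String))
    (l : Int) (hl : l ≤ 0) : pvGoB rows d l = d := by
  match rows with
  | [] => simp [pvGoB]
  | (k, iocs) :: rest => simp [pvGoB, hl]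

lemma pvOuter_eq_go (rows : List (String × List String)) (d : PySem.Dict String (List String))
    (l : Int) (hfresh : ∀ p ∈ rows, d.contains p.1 = false)
    (hnd : (rows.map Prod.fst).Nodup) :
    pvOuterA rows d l = pvGoB rows d l := by
  induction rows generalizing d l with
  | nil => simp [pvOuterA, pvGoB]
  | cons p rest ih =>
      obtain ⟨k, iocs⟩ := p
      have hck : d.contains k = false := hfresh (k, iocs) (by simp)
      simp only [List.map_cons, List.nodup_cons] at hnd
      by_cases hl : l ≤ 0
      · rw [pvOuterA_nonpos _ _ _ hl, pvGoB_nonpos _ _ _ hl]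
      · have hl' : 0 < l := by omega
        have hslice : PySem.List.slice iocs none (some l) = iocs.take l.toNat :=
          PySem.List.slice_to iocs (le_of_lt hl')
        match iocs, hck with
        | [], hck =>
            simp only [pvOuterA, pvInnerA, pvGoB, if_neg hl, hslice, List.take_nil, if_pos]
            exact ih d l (fun p hp => hfresh p (by simp [hp])) hnd.2
        | x :: tl, hck =>
            by_cases hlen : ((x :: tl).length : Int) ≤ l
            · -- the whole list fits in the budget
              have htake : (x :: tl).take l.toNat = x :: tl := by
                apply List.take_of_length_le
                simp only [List.length_cons] at hlen ⊢
                omega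
              have hA : pvOuterA ((k, x :: tl) :: rest) d l
                  = pvOuterA rest (d.insert k (x :: tl)) (l - (x :: tl).length) := by
                simp only [pvOuterA]
                rw [pvInnerA_run k (x :: tl) d l hlen, pvFold_modify_fresh k x tl d hck]
              have hB : pvGoB ((k, x :: tl) :: rest) d l
                  = pvGoB rest (d.insert k (x :: tl)) (l - (x :: tl).length) := by
                simp only [pvGoB, if_neg hl, hslice, htake]
                simp
              rw [hA, hB]
              have hfr : ∀ p ∈ rest, (d.insert k (x :: tl)).contains p.1 = false := by
                intro p hp
                rw [PySem.Dict.contains_insert]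
                have h1 : d.contains p.1 = false := hfresh p (by simp [hp])
                have h2 : p.1 ≠ k := by
                  intro h
                  exact hnd.1 (h ▸ (List.mem_map.mpr ⟨p, hp, rfl⟩))
                simp [h1, beq_eq_false_iff_ne.mpr h2]
              exact ih (d.insert k (x :: tl)) _ hfr hnd.2
            · -- the limit runs out inside this list: A returns; B's budget hits 0 and it breaks
              have hlen2 : l ≤ (tl.length : Int) := by
                have : ¬ ((tl.length : Int) + 1 ≤ l) := by simpa using hlen
                omega
              have hlt : l.toNat < (x :: tl).length := by
                simp only [List.length_cons]
                omega
              have htk : ((x :: tl).take l.toNat).length = l.toNat := by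
                rw [List.length_take, List.length_cons]
                omega
              have htne : (x :: tl).take l.toNat ≠ [] := by
                intro h
                rw [h] at htk
                simp at htk
                omega
              have hdz : (x :: tl).drop l.toNat ≠ [] := by
                intro h
                have := List.drop_eq_nil_iff.mp h
                omega
              have hfoldins : ((x :: tl).take l.toNat).foldl
                  (fun dd y => dd.modify k [] (· ++ [y])) d = d.insert k ((x :: tl).take l.toNat) := by
                match h' : (x :: tl).take l.toNat, htne with
                | t :: ts, _ => exact pvFold_modify_fresh k t ts d hck
              have h1 : pvInnerA k (x :: tl) d l = .inr (d.insert k ((x :: tl).take l.toNat)) := by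
                conv_lhs => rw [show x :: tl = (x :: tl).take l.toNat ++ (x :: tl).drop l.toNat by simp]
                rw [pvInnerA_stop k _ _ d l (by rw [htk]; exact Int.toNat_of_nonneg (le_of_lt hl')) hdz,
                  hfoldins]
              have hA : pvOuterA ((k, x :: tl) :: rest) d l = d.insert k ((x :: tl).take l.toNat) := by
                simp only [pvOuterA, h1]
              have hB : pvGoB ((k, x :: tl) :: rest) d l
                  = pvGoB rest (d.insert k ((x :: tl).take l.toNat)) (l - ((x :: tl).take l.toNat).length) := by
                simp only [pvGoB, if_neg hl, hslice, if_neg htne]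
              rw [hA, hB, pvGoB_nonpos]
              rw [htk]
              have : (l.toNat : Int) = l := Int.toNat_of_nonneg (le_of_lt hl')
              omega

-- ===== VERDICT (by name: the statement is the Claim_ definition above) =====
theorem limit_response_spec : Claim_equal_limit_response := by
  intro rd l _ hpre
  unfold Spec_limit_response limit_response limit_response_alt
  rw [pvOuter_eq_go rd PySem.Dict.empty l (fun p _ => PySem.Dict.contains_empty p.1) hpre]
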